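-- pv_equiv track=rewrite | github.com/KotisKotlyandii/lessons1 | ege22/97.py | f
-- ===== SOURCE A (Python) =====
-- def f(x):
--     x0 = x
--     N = 0
--     while x > 0:
--         d = x % 5
--         N = 10*N + d
--         x //= 5
--     N += x0
--     return N
-- ===== SOURCE B (Python) =====
-- def f(x):
--     if x <= 0:
--         return x
--
--     def g(t):
--         if t == 0:
--             return (0, 1)
--         n, p = g(t // 5)
--         return (n + (t % 5) * p, 10 * p)
--
--     return g(x)[0] + x
-- ===== Notes on version B (the rewrite author's own statement) =====
-- stated objective: alternative
-- what changed: Replaces the fused Horner while-loop (N = 10*N + d, updating x in place) by a recursive helper that first recurses on t//5 and then attaches the current base-5 digit with an explicitly maintained power of ten, building the reversed number least-significant digit first.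
import Mathlib
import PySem

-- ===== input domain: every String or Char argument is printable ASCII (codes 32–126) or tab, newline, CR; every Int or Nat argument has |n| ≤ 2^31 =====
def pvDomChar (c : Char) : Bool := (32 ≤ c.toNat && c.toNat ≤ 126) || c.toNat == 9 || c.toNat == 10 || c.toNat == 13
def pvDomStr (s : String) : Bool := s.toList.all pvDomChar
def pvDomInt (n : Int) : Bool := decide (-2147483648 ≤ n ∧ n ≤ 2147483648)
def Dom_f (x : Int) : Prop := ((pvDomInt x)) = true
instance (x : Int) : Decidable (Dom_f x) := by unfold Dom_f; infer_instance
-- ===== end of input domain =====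

-- B replaces the fused Horner while-loop by a recursion on t//5 that attaches
-- each base-5 digit with an explicit power of ten (alternative decomposition).


-- ===== PORT A =====
-- the while loop of A, carrying (x, N)
def fLoop (x N : Int) : Int :=
  if 0 < x then
    fLoop (PySem.Int.floordiv x 5) (10 * N + PySem.Int.mod x 5)
  else N
termination_by x.toNat
decreasing_by
  have h5 : PySem.Int.floordiv x 5 = x / 5 := PySem.Int.floordiv_eq_ediv_of_pos (by omega)
  rw [h5]; omega

def f (x : Int) : Int := fLoop x 0 + x

-- ===== PORT B =====
-- B's recursive helper g; Python only calls it with t ≥ 0, the `t ≤ 0` guard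
-- (Python writes `t == 0`) is only for Lean totality and unreachable otherwise
def g (t : Int) : Int × Int :=
  if h : t ≤ 0 then (0, 1)
  else
    let np := g (PySem.Int.floordiv t 5)
    (np.1 + PySem.Int.mod t 5 * np.2, 10 * np.2)
termination_by t.toNat
decreasing_by
  have h5 : PySem.Int.floordiv t 5 = t / 5 := PySem.Int.floordiv_eq_ediv_of_pos (by omega)
  rw [h5]; omega

def f_alt (x : Int) : Int :=
  if x ≤ 0 then x else (g x).1 + x

-- ===== PRECONDITION & SPEC =====
def Spec_f (x : Int) (out : Int) : Prop := out = f_alt x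
instance (x : Int) (out : Int) : Decidable (Spec_f x out) := by unfold Spec_f; infer_instance

-- ===== CLAIM (what is proved, stated in full; the proofs are below) =====
def Claim_equal_f : Prop := ∀ (x : Int), Dom_f x → Spec_f x (f x)

-- ===== LEMMAS AND PROOFS =====

-- loop/recursion correspondence: Horner accumulation = digit value + power scaling
theorem fLoop_eq_g (k : Nat) : ∀ (t N : Int), t.toNat = k → fLoop t N = N * (g t).2 + (g t).1 := by
  induction k using Nat.strong_induction_on with
  | _ k ih =>
    intro t N hk
    rw [fLoop, g]
    by_cases ht : 0 < t
    · have h5 : PySem.Int.floordiv t 5 = t / 5 := PySem.Int.floordiv_eq_ediv_of_pos (by omega)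
      have hlt : (t / 5).toNat < k := by rw [h5] at *; omega
      have := ih _ hlt (t / 5) (10 * N + PySem.Int.mod t 5) rfl
      simp only [ht, if_true, dif_neg (by omega : ¬ t ≤ 0), h5, this]
      ring
    · simp only [if_neg ht, dif_pos (by omega : t ≤ 0)]
      ring

-- ===== VERDICT (by name: the statement is the Claim_ definition above) =====
theorem f_spec : Claim_equal_f := by
  intro x _
  unfold Spec_f f f_alt
  by_cases hx : x ≤ 0
  · rw [if_pos hx, fLoop, if_neg (by omega)]; omega
  · rw [if_neg hx, fLoop_eq_g x.toNat x 0 rfl]; ring
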